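-- pv_equiv track=rewrite | github.com/Gargi-0707/Delivery-Health-Agent | reports/charts.py | _compact_chart_items
-- ===== SOURCE A (Python) =====
-- def _compact_chart_items(items: list, max_items: int = 6) -> list:
--     ordered = [(label, int(value)) for label, value in items if int(value) > 0]
--     ordered.sort(key=lambda item: (-item[1], item[0].lower()))
--     if len(ordered) <= max_items:
--         return ordered
--     head = ordered[: max_items - 1]
--     other_total = sum(v for _, v in ordered[max_items - 1 :])
--     head.append(("Other", other_total))
--     return head
-- ===== SOURCE B (Python) =====
-- def _compact_chart_items(items: list, max_items: int = 6) -> list: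
--     ordered = [(label, int(value)) for label, value in items if int(value) > 0]
--     if len(ordered) <= max_items:
--         ordered.sort(key=lambda item: (-item[1], item[0].lower()))
--         return ordered
--     # Bounded top-k selection: keep the k = max_items - 1 smallest keys seen so far
--     # in a sorted buffer (O(n*k) instead of sorting everything), and fold the grand
--     # total in the same pass; the original index in the key reproduces stable-sort
--     # tie order.
--     k = max_items - 1
--     best = []  # entries (key, label, value), ascending by key, at most k of them
--     total = 0
--     for idx, (label, value) in enumerate(ordered):
--         total += value
--         key = (-value, label.lower(), idx)
--         if len(best) < k or (best and key < best[-1][0]):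
--             pos = 0
--             while pos < len(best) and best[pos][0] < key:
--                 pos += 1
--             best.insert(pos, (key, label, value))
--             if len(best) > k:
--                 best.pop()
--     head = [(label, value) for _, label, value in best]
--     head.append(("Other", total - sum(v for _, v in head)))
--     return head
-- ===== Notes on version B (the rewrite author's own statement) =====
-- stated objective: alternative
-- what changed: Instead of fully sorting the filtered list and slicing, B makes one pass keeping only the max_items-1 best entries in a small sorted buffer (bounded top-k selection, index-augmented key for stable tie order) and accumulates the grand total in the same pass, deriving the 'Other' value by subtraction.
-- intended difference: For max_items <= 0 with more than 1-max_items surviving positive entries, A's negative slice stop ordered[:max_items-1] accidentally keeps all but the last 1-max_items sorted entries plus an 'Other' row, exceeding the requested maximum; B returns the single row ('Other', total), the intended collapse when no real rows are allowed. — e.g. on _compact_chart_items([("a", 1), ("b", 2)], 0): A returns [("b", 2), ("Other", 1)], B returns [("Other", 3)]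
import Mathlib
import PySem

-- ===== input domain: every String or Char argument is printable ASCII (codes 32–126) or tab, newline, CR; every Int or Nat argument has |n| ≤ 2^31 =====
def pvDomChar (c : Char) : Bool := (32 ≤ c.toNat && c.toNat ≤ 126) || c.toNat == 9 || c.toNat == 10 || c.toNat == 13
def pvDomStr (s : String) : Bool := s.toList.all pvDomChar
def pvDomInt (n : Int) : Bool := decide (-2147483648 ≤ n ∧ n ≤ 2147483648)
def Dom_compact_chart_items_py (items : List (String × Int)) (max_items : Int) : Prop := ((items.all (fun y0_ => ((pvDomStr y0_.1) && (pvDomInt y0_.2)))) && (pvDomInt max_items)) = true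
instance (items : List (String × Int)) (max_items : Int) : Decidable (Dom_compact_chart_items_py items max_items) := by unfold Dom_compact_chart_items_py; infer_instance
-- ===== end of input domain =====

-- B replaces A's full sort-then-slice with a one-pass bounded top-k selection (a small sorted
-- buffer of max_items-1 entries with an index-augmented key for stable tie order) plus a running
-- total, intended to avoid sorting the tail. Return values only: A sorts a list it built itself,
-- neither version mutates the caller's argument.

-- ===== PORT A =====
def compact_chart_items_py (items : List (String × Int)) (max_items : Int) : List (String × Int) :=
  let ordered := (items.filter (fun it => decide (0 < it.2))).map (fun it => (it.1, it.2))
  let ordered := PySem.List.sorted2 ordered (fun it => -it.2) (fun it => PySem.Str.lower it.1)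
  if PySem.List.len ordered ≤ max_items then ordered
  else
    let head := PySem.List.slice ordered none (some (max_items - 1))
    let other_total := ((PySem.List.slice ordered (some (max_items - 1)) none).map (fun it => it.2)).sum
    head ++ [("Other", other_total)]


-- ===== PORT B =====
-- tuple comparison key < key' on (-value, lower label, index)
def pvKeyLt (a b : Int × String × Int) : Bool :=
  decide (a.1 < b.1) ||
    (!decide (b.1 < a.1) &&
      (decide (a.2.1 < b.2.1) || (!decide (b.2.1 < a.2.1) && decide (a.2.2 < b.2.2))))

-- Source B's scan-and-insert into the sorted buffer (the `while pos …; best.insert(pos, …)` loop)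
def pvInsertBest (e : (Int × String × Int) × String × Int) :
    List ((Int × String × Int) × String × Int) → List ((Int × String × Int) × String × Int)
  | [] => [e]
  | b :: bs => if pvKeyLt b.1 e.1 then b :: pvInsertBest e bs else e :: b :: bs


-- Source B's loop body: fold the next enumerated item into (buffer, running total)
def pvStep (k : Int) (st : List ((Int × String × Int) × String × Int) × Int)
    (p : Int × (String × Int)) : List ((Int × String × Int) × String × Int) × Int :=
  let best := st.1
  let total := st.2 + p.2.2
  let key := (-p.2.2, PySem.Str.lower p.2.1, p.1)
  if decide ((best.length : Int) < k) ||
      (match best.getLast? with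
       | some e => pvKeyLt key e.1
       | none => false) then
    let best' := pvInsertBest (key, p.2.1, p.2.2) best
    (if decide (k < (best'.length : Int)) then best'.dropLast else best', total)
  else (best, total)

def compact_chart_items_py_alt (items : List (String × Int)) (max_items : Int) : List (String × Int) :=
  let ordered := items.filter (fun it => decide (0 < it.2))
  if PySem.List.len ordered ≤ max_items then
    PySem.List.sorted2 ordered (fun it => -it.2) (fun it => PySem.Str.lower it.1)
  else
    let st := (PySem.List.enumerate ordered).foldl (pvStep (max_items - 1)) ([], 0)
    let head := st.1.map (fun e => (e.2.1, e.2.2))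
    head ++ [("Other", st.2 - (head.map (fun it => it.2)).sum)]


-- ===== PRECONDITION & SPEC =====
-- For max_items ≤ 0 with more than 1-max_items surviving positive entries, A's negative slice stop
-- ordered[:max_items-1] accidentally keeps all but the last 1-max_items sorted entries plus an
-- 'Other' row (exceeding the requested maximum); B returns the single row ('Other', total), the
-- intended collapse when no real rows are allowed.
def D_compact_chart_items_py (items : List (String × Int)) (max_items : Int) : Prop :=
  max_items ≤ 0 ∧ 1 < (items.countP (fun it => decide (0 < it.2)) : Int) + max_items
instance (items : List (String × Int)) (max_items : Int) : Decidable (D_compact_chart_items_py items max_items) := by unfold D_compact_chart_items_py; infer_instance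

def Spec_compact_chart_items_py (items : List (String × Int)) (max_items : Int) (out : List (String × Int)) : Prop := ¬ D_compact_chart_items_py items max_items → out = compact_chart_items_py_alt items max_items
instance (items : List (String × Int)) (max_items : Int) (out : List (String × Int)) : Decidable (Spec_compact_chart_items_py items max_items out) := by unfold Spec_compact_chart_items_py; infer_instance

def pvDiffWitness_compact_chart_items_py : (List (String × Int)) × Int := ([("a", 1), ("b", 2)], 0)
def pvDiffWitnessOut_compact_chart_items_py : (List (String × Int)) × (List (String × Int)) :=
  ([("b", 2), ("Other", 1)], [("Other", 3)])

-- ===== CLAIM (what is proved, stated in full; the proofs are below) =====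
def Claim_unchanged_compact_chart_items_py : Prop := ∀ (items : List (String × Int)) (max_items : Int), Dom_compact_chart_items_py items max_items → Spec_compact_chart_items_py items max_items (compact_chart_items_py items max_items)
def Claim_changed_compact_chart_items_py : Prop := Dom_compact_chart_items_py (pvDiffWitness_compact_chart_items_py.1) (pvDiffWitness_compact_chart_items_py.2) ∧ D_compact_chart_items_py (pvDiffWitness_compact_chart_items_py.1) (pvDiffWitness_compact_chart_items_py.2) ∧ compact_chart_items_py (pvDiffWitness_compact_chart_items_py.1) (pvDiffWitness_compact_chart_items_py.2) = pvDiffWitnessOut_compact_chart_items_py.1 ∧ compact_chart_items_py_alt (pvDiffWitness_compact_chart_items_py.1) (pvDiffWitness_compact_chart_items_py.2) = pvDiffWitnessOut_compact_chart_items_py.2 ∧ pvDiffWitnessOut_compact_chart_items_py.1 ≠ pvDiffWitnessOut_compact_chart_items_py.2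
def Claim_exact_compact_chart_items_py : Prop := ∀ (items : List (String × Int)) (max_items : Int), Dom_compact_chart_items_py items max_items → D_compact_chart_items_py items max_items → compact_chart_items_py items max_items ≠ compact_chart_items_py_alt items max_items

-- ===== LEMMAS AND PROOFS =====

-- the lex value of a key triple / the selection key of an enumerated item / its buffer entry
def pvK3 (a : Int × String × Int) : Lex (Int × Lex (String × Int)) := toLex (a.1, toLex (a.2.1, a.2.2))
def pvKeyP (p : Int × (String × Int)) : Lex (Int × Lex (String × Int)) :=
  toLex (-p.2.2, toLex (PySem.Str.lower p.2.1, p.1))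
def pvEntry (p : Int × (String × Int)) : (Int × String × Int) × String × Int :=
  ((-p.2.2, PySem.Str.lower p.2.1, p.1), p.2.1, p.2.2)


-- insertion step of the reference insertion sort over enumerated items
def pvInsP (acc : List (Int × (String × Int))) (p : Int × (String × Int)) :
    List (Int × (String × Int)) :=
  PySem.List.insertBy (fun a b => decide (pvKeyP a < pvKeyP b)) p acc


lemma pvKeyLt_iff (a b : Int × String × Int) : pvKeyLt a b = true ↔ pvK3 a < pvK3 b := by
  simp only [pvKeyLt, pvK3, Prod.Lex.toLex_lt_toLex, Bool.or_eq_true, Bool.and_eq_true,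
    Bool.not_eq_true', decide_eq_true_eq, decide_eq_false_iff_not]
  constructor
  · rintro (h | ⟨h1, (h2 | ⟨h3, h4⟩)⟩)
    · exact Or.inl h
    · rcases lt_or_eq_of_le (not_lt.mp h1) with h' | h'
      · exact Or.inl h'
      · exact Or.inr ⟨h', Or.inl h2⟩
    · rcases lt_or_eq_of_le (not_lt.mp h1) with h' | h'
      · exact Or.inl h'
      · rcases lt_or_eq_of_le (not_lt.mp h3) with h'' | h''
        · exact Or.inr ⟨h', Or.inl h''⟩
        · exact Or.inr ⟨h', Or.inr ⟨h'', h4⟩⟩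
  · rintro (h | ⟨h1, (h2 | ⟨h3, h4⟩)⟩)
    · exact Or.inl h
    · exact Or.inr ⟨by simp [h1], Or.inl h2⟩
    · exact Or.inr ⟨by simp [h1], Or.inr ⟨by simp [h3], h4⟩⟩

lemma pvKeyP_idx {p q : Int × (String × Int)} (h : pvKeyP p = pvKeyP q) : p.1 = q.1 := by
  simp only [pvKeyP] at h
  have h1 := congrArg (fun x => (ofLex x).2) h
  have h2 := congrArg (fun x => (ofLex (ofLex x).2).2) h
  simpa using h2

lemma length_insertBy {α : Type} (before : α → α → Bool) (x : α) (l : List α) :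
    (PySem.List.insertBy before x l).length = l.length + 1 := by
  induction l with
  | nil => rfl
  | cons y ys ih => simp only [PySem.List.insertBy]; split <;> simp [ih]

lemma insertBy_append_not {α : Type} (before : α → α → Bool) (x : α) (xs ys : List α)
    (h : ∀ q ∈ xs, before x q = false) :
    PySem.List.insertBy before x (xs ++ ys) = xs ++ PySem.List.insertBy before x ys := by
  induction xs with
  | nil => rfl
  | cons z zs ih =>
    simp only [List.cons_append, PySem.List.insertBy, h z (by simp)]
    simp only [Bool.false_eq_true, if_false, List.cons.injEq, true_and]
    exact ih (fun q hq => h q (by simp [hq]))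

lemma insertBy_append_ex {α : Type} (before : α → α → Bool) (x : α) (xs ys : List α)
    (h : ∃ q ∈ xs, before x q = true) :
    PySem.List.insertBy before x (xs ++ ys) = PySem.List.insertBy before x xs ++ ys := by
  induction xs with
  | nil => simp at h
  | cons z zs ih =>
    by_cases hz : before x z = true
    · simp [PySem.List.insertBy, hz]
    · obtain ⟨q, hq, hbq⟩ := h
      rcases List.mem_cons.mp hq with rfl | hq
      · exact absurd hbq hz
      · simp only [List.cons_append, PySem.List.insertBy, hz, Bool.false_eq_true, if_false]
        rw [ih ⟨q, hq, hbq⟩]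

lemma pvInsertBest_map (p : Int × (String × Int)) (cs : List (Int × (String × Int)))
    (h : ∀ q ∈ cs, pvKeyP q ≠ pvKeyP p) :
    pvInsertBest (pvEntry p) (cs.map pvEntry) = (pvInsP cs p).map pvEntry := by
  induction cs with
  | nil => rfl
  | cons q qs ih =>
    have hne : pvKeyP q ≠ pvKeyP p := h q (by simp)
    by_cases hlt : pvKeyP q < pvKeyP p
    · have h1 : pvKeyLt (pvEntry q).1 (pvEntry p).1 = true := (pvKeyLt_iff _ _).mpr hlt
      have h2 : (decide (pvKeyP q < pvKeyP p)) = true := by simpa using hlt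
      simp only [List.map_cons, pvInsertBest, h1, if_true, pvInsP, PySem.List.insertBy]
      have : ¬ (pvKeyP p < pvKeyP q) := lt_asymm hlt
      simp only [this, decide_false, Bool.false_eq_true, if_false, List.map_cons]
      rw [ih (fun r hr => h r (by simp [hr]))]; rfl
    · have hplt : pvKeyP p < pvKeyP q := lt_of_le_of_ne (not_lt.mp hlt) (Ne.symm hne)
      have h1 : pvKeyLt (pvEntry q).1 (pvEntry p).1 = false := by
        rw [Bool.eq_false_iff]; intro hc; exact hlt ((pvKeyLt_iff _ _).mp hc)
      simp only [List.map_cons, pvInsertBest, h1, Bool.false_eq_true, if_false, pvInsP,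
        PySem.List.insertBy, hplt, decide_true, if_true, List.map_cons]

lemma pairwise_insP (p : Int × (String × Int)) (cs : List (Int × (String × Int)))
    (hs : cs.Pairwise (fun a b => pvKeyP a < pvKeyP b)) (h : ∀ q ∈ cs, pvKeyP q ≠ pvKeyP p) :
    (pvInsP cs p).Pairwise (fun a b => pvKeyP a < pvKeyP b) := by
  induction cs with
  | nil => simp [pvInsP, PySem.List.insertBy]
  | cons q qs ih =>
    rcases List.pairwise_cons.mp hs with ⟨hq, hqs⟩
    by_cases hlt : pvKeyP p < pvKeyP q
    · simp only [pvInsP, PySem.List.insertBy, hlt, decide_true, if_true]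
      refine List.pairwise_cons.mpr ⟨?_, hs⟩
      intro b hb
      rcases List.mem_cons.mp hb with rfl | hb
      · exact hlt
      · exact lt_trans hlt (hq b hb)
    · have hne : pvKeyP q ≠ pvKeyP p := h q (by simp)
      have hqp : pvKeyP q < pvKeyP p := lt_of_le_of_ne (not_lt.mp hlt) hne
      simp only [pvInsP, PySem.List.insertBy, hlt, decide_false, Bool.false_eq_true, if_false]
      refine List.pairwise_cons.mpr ⟨?_, ih hqs (fun r hr => h r (by simp [hr]))⟩
      intro b hb
      rcases (PySem.List.mem_insertBy _ _ _ _).mp hb with rfl | hb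
      · exact hqp
      · exact hq b hb
lemma pvStep_eq (k : Int) (p : Int × (String × Int)) (t : Int)
    (cs : List (Int × (String × Int)))
    (hidx : ∀ q ∈ cs, q.1 < p.1) (hpw : cs.Pairwise (fun a b => pvKeyP a < pvKeyP b)) :
    pvStep k ((cs.take k.toNat).map pvEntry, t) p
      = (((pvInsP cs p).take k.toNat).map pvEntry, t + p.2.2) := by
  have fresh : ∀ q ∈ cs, pvKeyP q ≠ pvKeyP p := by
    intro q hq h
    have := pvKeyP_idx h
    have := hidx q hq
    omega
  have hkey : ((-p.2.2, PySem.Str.lower p.2.1, p.1), p.2.1, p.2.2) = pvEntry p := rfl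
  by_cases hk : k ≤ 0
  · have hkn : k.toNat = 0 := by omega
    simp only [pvStep, hkn, List.take_zero, List.map_nil, List.length_nil, Int.natCast_zero,
      List.getLast?_nil]
    have : ¬ ((0:Int) < k) := by omega
    simp [this]
  · have hk1 : 0 < k := by omega
    have hknk : (k.toNat : Int) = k := by omega
    by_cases hlen : cs.length < k.toNat
    · -- buffer not yet full: plain insert on both sides
      have htake : cs.take k.toNat = cs := List.take_of_length_le (by omega)
      have hcond : (decide (((cs.map pvEntry).length : Int) < k)) = true := by
        simp only [List.length_map]; exact decide_eq_true (by omega)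
      have hins := pvInsertBest_map p cs fresh
      have hlen' : (pvInsP cs p).length = cs.length + 1 := length_insertBy _ _ _
      have htake' : (pvInsP cs p).take k.toNat = pvInsP cs p :=
        List.take_of_length_le (by omega)
      simp only [pvStep, hkey, htake, hins]
      split_ifs with h1 h2
      · exfalso
        rw [decide_eq_true_eq, List.length_map, hlen'] at h2
        push_cast at h2; omega
      · rw [htake']
      · exact absurd (by rw [Bool.or_eq_true]
                         exact Or.inl (by
                           simp only [List.length_map]
                           exact decide_eq_true (by omega))) h1

    · -- buffer full (length = k)
      have hkle : k.toNat ≤ cs.length := by omega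
      have hlt : (cs.take k.toNat).length = k.toNat := by simp [List.length_take]; omega
      have hq1 : k.toNat - 1 < cs.length := by omega
      set q1 := cs[k.toNat - 1]
      have hlast : ((cs.take k.toNat).map pvEntry).getLast? = some (pvEntry q1) := by
        rw [List.getLast?_map, List.getLast?_eq_getElem?]
        rw [hlt, List.getElem?_take]
        have h1 : k.toNat - 1 < k.toNat := by omega
        simp only [h1, if_true, List.getElem?_eq_getElem hq1, Option.map_some]
        rfl
      have hcond1 : (decide ((((cs.take k.toNat).map pvEntry).length : Int) < k)) = false := by
        simp only [List.length_map, hlt, hknk]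
        exact decide_eq_false (by omega)
      have hmemtake : ∀ q ∈ cs.take k.toNat, pvKeyP q = pvKeyP q1 ∨ pvKeyP q < pvKeyP q1 := by
        intro q hq
        rcases List.mem_iff_getElem.mp hq with ⟨i, hi, rfl⟩
        have hikn : i < k.toNat := by have := hi; rw [hlt] at this; exact this
        rw [List.getElem_take]
        rcases Nat.lt_or_ge i (k.toNat - 1) with hi' | hi'
        · exact Or.inr (List.pairwise_iff_getElem.mp hpw i (k.toNat - 1) (by omega) hq1 (by omega))
        · have : i = k.toNat - 1 := by omega
          subst this; exact Or.inl rfl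
      by_cases hc : pvKeyP p < pvKeyP q1
      · -- insert lands inside the buffer; trim the last entry
        have hcond2 : pvKeyLt (-p.2.2, PySem.Str.lower p.2.1, p.1) (pvEntry q1).1 = true :=
          (pvKeyLt_iff (pvEntry p).1 (pvEntry q1).1).mpr hc
        have freshtake : ∀ q ∈ cs.take k.toNat, pvKeyP q ≠ pvKeyP p :=
          fun q hq => fresh q (List.mem_of_mem_take hq)
        have hins := pvInsertBest_map p (cs.take k.toNat) freshtake
        have hzslen : (pvInsP (cs.take k.toNat) p).length = k.toNat + 1 := by
          simp only [pvInsP]; rw [length_insertBy, hlt]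
        have hsplit : pvInsP cs p
            = pvInsP (cs.take k.toNat) p ++ cs.drop k.toNat := by
          conv_lhs => rw [pvInsP, ← List.take_append_drop k.toNat cs]
          exact insertBy_append_ex _ _ _ _
            ⟨q1, by rw [List.mem_iff_getElem]; exact ⟨k.toNat - 1, by rw [hlt]; omega,
                    List.getElem_take⟩, decide_eq_true hc⟩
        have htrim : (decide (k < (((pvInsP (cs.take k.toNat) p).map pvEntry).length : Int)))
            = true := by
          simp only [List.length_map, hzslen]
          exact decide_eq_true (by push_cast; omega)
        simp only [pvStep, hlast, hcond1, Bool.false_or, hkey, hcond2, if_true, hins, htrim]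
        rw [hsplit, List.take_append]
        have h0 : k.toNat - (pvInsP (cs.take k.toNat) p).length = 0 := by omega
        rw [h0, List.take_zero, List.append_nil]
        rw [← List.map_dropLast, List.dropLast_eq_take, hzslen]
        simp
      · -- key not smaller than the buffer's last: buffer unchanged
        have hq1p : pvKeyP q1 < pvKeyP p :=
          lt_of_le_of_ne (not_lt.mp hc) (fresh q1 (List.mem_iff_getElem.mpr ⟨_, hq1, rfl⟩))
        have hcond2 : pvKeyLt (-p.2.2, PySem.Str.lower p.2.1, p.1) (pvEntry q1).1 = false := by
          rw [Bool.eq_false_iff]; intro hcc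
          exact absurd ((pvKeyLt_iff (pvEntry p).1 (pvEntry q1).1).mp hcc) hc
        have hsplit : pvInsP cs p
            = cs.take k.toNat ++ PySem.List.insertBy
                (fun a b => decide (pvKeyP a < pvKeyP b)) p (cs.drop k.toNat) := by
          conv_lhs => rw [pvInsP, ← List.take_append_drop k.toNat cs]
          refine insertBy_append_not _ _ _ _ ?_
          intro q hq
          rcases hmemtake q hq with h | h
          · exact decide_eq_false (by rw [h]; exact hc)
          · exact decide_eq_false (fun hcc => hc (lt_trans hcc h))
        simp only [pvStep, hlast, hcond1, Bool.false_or, hkey, hcond2, Bool.false_eq_true,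
          if_false]
        rw [hsplit, List.take_append, hlt]
        have h0 : k.toNat - k.toNat = 0 := by omega
        rw [h0, List.take_zero, List.append_nil, List.take_take]
        simp

lemma pvFold_inv (k : Int) (xs : List (String × Int)) :
    ∀ (s t : Int) (cs : List (Int × (String × Int))),
      (∀ p ∈ cs, p.1 < s) → cs.Pairwise (fun a b => pvKeyP a < pvKeyP b) →
      (PySem.List.enumerate xs s).foldl (pvStep k) ((cs.take k.toNat).map pvEntry, t)
        = ((((PySem.List.enumerate xs s).foldl pvInsP cs).take k.toNat).map pvEntry,
           t + (xs.map (fun it => it.2)).sum) := by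
  induction xs with
  | nil => intro s t cs _ _; simp [PySem.List.enumerate]
  | cons x xs ih =>
    intro s t cs hidx hpw
    rw [PySem.List.enumerate_cons, List.foldl_cons, List.foldl_cons]
    have hidx' : ∀ q ∈ cs, q.1 < (s, x).1 := hidx
    rw [pvStep_eq k (s, x) t cs hidx' hpw]
    have hfresh : ∀ q ∈ cs, pvKeyP q ≠ pvKeyP (s, x) := by
      intro q hq h
      have := pvKeyP_idx h
      have := hidx q hq
      simp at this ⊢
      omega
    rw [ih (s + 1) (t + x.2) (pvInsP cs (s, x))
        (by intro q hq
            rcases (PySem.List.mem_insertBy _ _ _ _).mp hq with rfl | hq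
            · simp
            · have := hidx q hq; omega)
        (pairwise_insP (s, x) cs hpw hfresh)]
    simp only [List.map_cons, List.sum_cons]
    ring_nf

lemma pvCond_eq (x y : String × Int) (s i : Int) (h : i < s) :
    decide (pvKeyP (s, x) < pvKeyP (i, y))
      = (decide ((-x.2 : Int) < -y.2) ||
          (!decide ((-y.2 : Int) < -x.2) && decide (PySem.Str.lower x.1 < PySem.Str.lower y.1))) := by
  simp only [pvKeyP, Prod.Lex.toLex_lt_toLex]
  rcases lt_trichotomy (-x.2 : Int) (-y.2) with h1 | h1 | h1
  · simp [h1, lt_asymm h1]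
  · have hxy : ¬ ((-y.2 : Int) < -x.2) := by omega
    simp only [h1, lt_irrefl, false_or, true_and, decide_false, Bool.not_false,
      Bool.true_and]
    rcases lt_trichotomy (PySem.Str.lower x.1) (PySem.Str.lower y.1) with h2 | h2 | h2
    · simp [h2]
    · simp [h2]; omega
    · simp [lt_asymm h2]
      intro h3
      exact absurd h3 (ne_of_gt h2)
  · simp [lt_asymm h1, h1]
    intro h2
    omega

lemma map_snd_insertBy (x : String × Int) (s : Int) (cs : List (Int × (String × Int)))
    (h : ∀ p ∈ cs, p.1 < s) :
    (pvInsP cs (s, x)).map (fun p => p.2)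
      = PySem.List.insertBy
          (fun a b => decide ((-a.2 : Int) < -b.2) ||
            (!decide ((-b.2 : Int) < -a.2) && decide (PySem.Str.lower a.1 < PySem.Str.lower b.1)))
          x (cs.map (fun p => p.2)) := by
  induction cs with
  | nil => rfl
  | cons q qs ih =>
    have hq : q.1 < s := h q (by simp)
    have h2 := pvCond_eq x q.2 s q.1 hq
    by_cases hc : pvKeyP (s, x) < pvKeyP q
    · have h3 := h2.symm.trans (decide_eq_true hc)
      simp only [pvInsP, PySem.List.insertBy, hc, decide_true, if_true, List.map_cons, h3]
    · have h3 := h2.symm.trans (decide_eq_false hc)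
      simp only [pvInsP, PySem.List.insertBy, hc, decide_false, Bool.false_eq_true, if_false,
        List.map_cons, h3]
      exact congrArg (q.2 :: ·) (ih (fun p hp => h p (by simp [hp])))

lemma map_snd_foldl_insP (xs : List (String × Int)) :
    ∀ (s : Int) (cs : List (Int × (String × Int))), (∀ p ∈ cs, p.1 < s) →
      ((PySem.List.enumerate xs s).foldl pvInsP cs).map (fun p => p.2)
        = xs.foldl
            (fun acc x => PySem.List.insertBy
              (fun a b => decide ((-a.2 : Int) < -b.2) ||
                (!decide ((-b.2 : Int) < -a.2) &&
                  decide (PySem.Str.lower a.1 < PySem.Str.lower b.1))) x acc)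
            (cs.map (fun p => p.2)) := by
  induction xs with
  | nil => intro s cs _; simp [PySem.List.enumerate]
  | cons x xs ih =>
    intro s cs h
    rw [PySem.List.enumerate_cons, List.foldl_cons, List.foldl_cons]
    rw [ih (s + 1) (pvInsP cs (s, x))
        (by intro q hq
            rcases (PySem.List.mem_insertBy _ _ _ _).mp hq with rfl | hq
            · simp
            · have := h q hq; omega)]
    rw [map_snd_insertBy x s cs h]

lemma sorted2_eq (xs : List (String × Int)) :
    PySem.List.sorted2 xs (fun it => -it.2) (fun it => PySem.Str.lower it.1)
      = ((PySem.List.enumerate xs 0).foldl pvInsP []).map (fun p => p.2) := by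
  rw [map_snd_foldl_insP xs 0 [] (by simp)]
  rfl
lemma pv_main (items : List (String × Int)) (max_items : Int)
    (hD : ¬ (max_items ≤ 0 ∧ 1 < ((items.filter (fun it => decide (0 < it.2))).length : Int) + max_items)) :
    compact_chart_items_py items max_items = compact_chart_items_py_alt items max_items := by
  set S := items.filter (fun it => decide (0 < it.2)) with hS
  have hmapid : S.map (fun it => (it.1, it.2)) = S := by simp
  set C := (PySem.List.enumerate S 0).foldl pvInsP [] with hC
  have hsorted : PySem.List.sorted2 S (fun it => -it.2) (fun it => PySem.Str.lower it.1)
      = C.map (fun p => p.2) := sorted2_eq S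
  have hlenC : C.length = S.length := by
    have h := (PySem.List.sorted2_perm S (fun it => -it.2) (fun it => PySem.Str.lower it.1) false).length_eq
    rw [hsorted] at h
    simpa using h
  have hlen : (PySem.List.sorted2 S (fun it => -it.2) (fun it => PySem.Str.lower it.1)).length
      = S.length := by rw [hsorted, List.length_map, hlenC]
  by_cases hc : (S.length : Int) ≤ max_items
  · -- small case: both sort and return
    simp only [compact_chart_items_py, compact_chart_items_py_alt, hmapid, ← hS,
      PySem.List.len, hlen]
    rw [if_pos hc, if_pos hc]
  · -- selection case
    have hfold := pvFold_inv (max_items - 1) S 0 0 [] (by simp) (by simp)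
    simp only [List.take_nil, List.map_nil] at hfold
    simp only [compact_chart_items_py, compact_chart_items_py_alt, hmapid, ← hS,
      PySem.List.len, hlen]
    rw [if_neg hc, if_neg hc]
    rw [hfold]
    have hhead : (((((PySem.List.enumerate S 0).foldl pvInsP []).take (max_items-1).toNat).map pvEntry).map
        (fun e => (e.2.1, e.2.2)))
        = (PySem.List.sorted2 S (fun it => -it.2) (fun it => PySem.Str.lower it.1)).take (max_items-1).toNat := by
      rw [List.map_map, hsorted, ← List.map_take]
      rfl
    rw [hhead]
    have hsum : ((PySem.List.sorted2 S (fun it => -it.2) (fun it => PySem.Str.lower it.1)).map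
        (fun it => it.2)).sum = (S.map (fun it => it.2)).sum :=
      ((PySem.List.sorted2_perm S _ _ false).map (fun it => it.2)).sum_eq
    set L := PySem.List.sorted2 S (fun it => -it.2) (fun it => PySem.Str.lower it.1) with hL
    by_cases hm : 1 ≤ max_items
    · have hge : (0 : Int) ≤ max_items - 1 := by omega
      rw [PySem.List.slice_to _ hge, PySem.List.slice_from _ hge]
      have hsplitsum : (L.map (fun it => it.2)).sum
          = ((L.take (max_items - 1).toNat).map (fun it => it.2)).sum
            + ((L.drop (max_items - 1).toNat).map (fun it => it.2)).sum := by
        conv_lhs => rw [← List.take_append_drop (max_items - 1).toNat L]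
        rw [List.map_append, List.sum_append]
      have : ((L.drop (max_items - 1).toNat).map (fun it => it.2)).sum
          = 0 + (S.map (fun it => it.2)).sum
            - ((L.take (max_items - 1).toNat).map (fun it => it.2)).sum := by
        rw [← hsum, hsplitsum]; ring
      rw [this]
    · have hmax0 : max_items ≤ 0 := by omega
      have hlen1 : (S.length : Int) + max_items ≤ 1 := by
        by_contra hcc
        exact hD ⟨hmax0, by omega⟩
      have hkn : (max_items - 1).toNat = 0 := by omega
      have hcl : PySem.List.clampIdx L.length (max_items - 1) = 0 := by
        rw [hL, hlen]
        unfold PySem.List.clampIdx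
        split_ifs <;> omega
      have h1 : PySem.List.slice L none (some (max_items - 1)) = [] := by
        simp [PySem.List.slice, hcl]
      have h2 : PySem.List.slice L (some (max_items - 1)) = L := by
        simp [PySem.List.slice, hcl]
      rw [h1, h2, hkn]
      simp [hsum]

lemma pv_tight (items : List (String × Int)) (max_items : Int)
    (hD : max_items ≤ 0 ∧ 1 < ((items.filter (fun it => decide (0 < it.2))).length : Int) + max_items) :
    compact_chart_items_py items max_items ≠ compact_chart_items_py_alt items max_items := by
  obtain ⟨hmax0, hgt⟩ := hD
  intro heq
  have hkey := congrArg List.length heq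
  set S := items.filter (fun it => decide (0 < it.2)) with hS
  have hmapid : S.map (fun it => (it.1, it.2)) = S := by simp
  set C := (PySem.List.enumerate S 0).foldl pvInsP [] with hC
  have hsorted : PySem.List.sorted2 S (fun it => -it.2) (fun it => PySem.Str.lower it.1)
      = C.map (fun p => p.2) := sorted2_eq S
  have hlenC : C.length = S.length := by
    have h := (PySem.List.sorted2_perm S (fun it => -it.2) (fun it => PySem.Str.lower it.1) false).length_eq
    rw [hsorted] at h
    simpa using h
  have hlen : (PySem.List.sorted2 S (fun it => -it.2) (fun it => PySem.Str.lower it.1)).length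
      = S.length := by rw [hsorted, List.length_map, hlenC]
  have hc : ¬ ((S.length : Int) ≤ max_items) := by omega
  have hfold := pvFold_inv (max_items - 1) S 0 0 [] (by simp) (by simp)
  simp only [List.take_nil, List.map_nil] at hfold
  have hkn : (max_items - 1).toNat = 0 := by omega
  rw [hkn, List.take_zero, List.map_nil] at hfold
  simp only [compact_chart_items_py, compact_chart_items_py_alt, hmapid, ← hS,
    PySem.List.len, hlen] at hkey
  rw [if_neg hc, if_neg hc, hfold] at hkey
  set L := PySem.List.sorted2 S (fun it => -it.2) (fun it => PySem.Str.lower it.1) with hL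
  have hcl : PySem.List.clampIdx L.length (max_items - 1)
      = ((S.length : Int) + max_items - 1).toNat := by
    rw [hL, hlen]
    unfold PySem.List.clampIdx
    split_ifs <;> omega
  have hslice : PySem.List.slice L none (some (max_items - 1))
      = L.take ((S.length : Int) + max_items - 1).toNat := by
    simp [PySem.List.slice, hcl]
  rw [hslice] at hkey
  simp only [List.length_append, List.length_take, List.length_map, List.length_nil,
    List.length_cons, hlen] at hkey
  omega

-- ===== VERDICT (by name: the statements are the Claim_ definitions above) =====
theorem compact_chart_items_py_spec : Claim_unchanged_compact_chart_items_py := by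
  unfold Claim_unchanged_compact_chart_items_py Spec_compact_chart_items_py
  intro items max_items _ hD
  unfold D_compact_chart_items_py at hD
  rw [List.countP_eq_length_filter] at hD
  exact pv_main items max_items hD

theorem compact_chart_items_py_changed : Claim_changed_compact_chart_items_py := by
  unfold Claim_changed_compact_chart_items_py; decide

theorem compact_chart_items_py_tight : Claim_exact_compact_chart_items_py := by
  unfold Claim_exact_compact_chart_items_py
  intro items max_items _ hD
  unfold D_compact_chart_items_py at hD
  rw [List.countP_eq_length_filter] at hD
  exact pv_tight items max_items hD
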